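-- pv_equiv track=rewrite | github.com/advay168/advent-of-code | 2023/day12/solution-part-1.py | perms
-- ===== SOURCE A (Python) =====
-- def is_possible_rle(cs, rle):
--     rle = rle[:]
--     prev = ""
--     for c in cs:
--         match c:
--             case "#":
--                 if len(rle) == 0:
--                     return False
--                 rle[0] -= 1
--             case ".":
--                 if prev == "#":
--                     if rle[0] != 0:
--                         return False
--                     rle = rle[1:]
--             case "?":
--                 return True
--         prev = c
--     return rle == [] or rle == [0]
--
-- def perms(report, rle, count):
--     if "?" not in report:
--         return 1
--     idx = report.index("?")
--     report[idx] = "."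
--     ret = 0
--     if is_possible_rle(report, rle):
--         ret += perms(report, rle, count)
--     if count > 0:
--         report[idx] = "#"
--         if is_possible_rle(report, rle):
--             ret += perms(report, rle, count - 1)
--     report[idx] = "?"
--     return ret
-- ===== SOURCE B (Python) =====
-- def perms(report, rle, count):
--     if "?" not in report:
--         return 1
--     m = len(rle)
--     # forward DP over the report; state = (rle index j, amount d consumed from rle[j],
--     # previous char was '#', number of '?' replaced by '#'), weight = number of ways
--     states = {(0, 0, False, 0): 1}
--     for c in report:
--         new = {}
--         for (j, d, ph, u), w in states.items():
--             choices = [".", "#"] if c == "?" else [c]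
--             for ch in choices:
--                 if ch == "#":
--                     if c == "?" and u >= count:
--                         continue
--                     if j >= m:
--                         continue
--                     key = (j, d + 1, True, u + (1 if c == "?" else 0))
--                 elif ch == ".":
--                     if ph:
--                         if rle[j] != d:
--                             continue
--                         key = (j + 1, 0, False, u)
--                     else:
--                         key = (j, d, False, u)
--                 else:
--                     key = (j, d, False, u)
--                 new[key] = new.get(key, 0) + w
--         states = new
--     total = 0
--     for (j, d, ph, u), w in states.items():
--         if j == m or (j == m - 1 and rle[j] == d):
--             total += w
--     return total
-- ===== Notes on version B (the rewrite author's own statement) =====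
-- stated objective: alternative
-- what changed: Replaced the exponential substitute-first-'?'-and-revalidate recursion with a single forward dynamic-programming pass that carries a dictionary of weighted automaton states (rle index, run consumption, prev-is-'#', '#'-replacements used); exponential only in A, but not measurably faster on the benchmark inputs.
import Mathlib
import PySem

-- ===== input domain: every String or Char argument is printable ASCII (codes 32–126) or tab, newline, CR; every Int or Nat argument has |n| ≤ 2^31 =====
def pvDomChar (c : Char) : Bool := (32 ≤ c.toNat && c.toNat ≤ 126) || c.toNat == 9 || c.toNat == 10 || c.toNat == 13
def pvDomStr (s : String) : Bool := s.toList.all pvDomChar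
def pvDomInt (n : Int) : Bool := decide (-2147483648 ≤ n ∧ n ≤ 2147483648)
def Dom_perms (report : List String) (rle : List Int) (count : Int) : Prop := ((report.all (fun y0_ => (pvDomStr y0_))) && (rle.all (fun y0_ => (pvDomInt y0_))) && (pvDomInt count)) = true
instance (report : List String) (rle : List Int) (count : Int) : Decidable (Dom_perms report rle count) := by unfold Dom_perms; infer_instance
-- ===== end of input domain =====

-- B replaces A's substitute-first-'?'-and-revalidate recursion by one forward DP pass over the
-- report carrying a dictionary of weighted automaton states (objective: alternative).
-- A restores its in-place mutation of `report` before returning, so neither program has a net side effect.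

-- ===== PORT A =====
-- is_possible_rle(cs, rle): loop over cs with state (rle, prev) and early returns
def ipr (cs : List String) (rle : List Int) (prev : String) : Bool :=
  match cs with
  | [] => rle == ([] : List Int) || rle == [0]
  | c :: rest =>
    if c = "#" then
      if rle.length = 0 then false
      else ipr rest ((rle.headD 0 - 1) :: rle.tail) c   -- rle[0] -= 1 (rle nonempty here)
    else if c = "." then
      if prev = "#" then
        if rle.headD 0 ≠ 0 then false   -- rle[0]: rle is nonempty whenever prev == "#"
        else ipr rest rle.tail c        -- rle = rle[1:]
      else ipr rest rle c
    else if c = "?" then true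
    else ipr rest rle c

def isPossibleRle (cs : List String) (rle : List Int) : Bool := ipr cs rle ""

-- termination helper for perms: replacing the found "?" by a non-"?" lowers the number of "?"s
lemma pv_count_set_lt {l : List String} {k : Nat} (h : PySem.List.index? l "?" = some k)
    {x : String} (hx : x ≠ "?") : (l.set k x).count "?" < l.count "?" := by
  obtain ⟨pre, suf, rfl, hk, hpre⟩ := (PySem.List.index?_eq_some_iff l "?" k).mp h
  subst hk
  have hset : (pre ++ "?" :: suf).set pre.length x = pre ++ x :: suf := by
    induction pre with
    | nil => rfl
    | cons a t ih => simpa using ih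
  rw [hset]
  simp only [List.count_append, List.count_cons]
  have : ((x == "?") : Bool) = false := by simp [hx]
  simp [this]

-- perms(report, rle, count): Python tests membership then takes report.index("?"); the two are
-- combined into one match on index? (none ⟺ "?" not in report). The in-place writes
-- report[idx] = "." / "#" become List.set (the final restoring write has no effect on the result).
def perms (report : List String) (rle : List Int) (count : Int) : Int :=
  match hidx : PySem.List.index? report "?" with
  | none => 1
  | some idx =>
    let r1 := report.set idx "."
    let ret : Int := if isPossibleRle r1 rle then perms r1 rle count else 0
    if count > 0 then
      let r2 := report.set idx "#"
      ret + (if isPossibleRle r2 rle then perms r2 rle (count - 1) else 0)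
    else ret
termination_by report.count "?"
decreasing_by
  · exact pv_count_set_lt hidx (by decide)
  · exact pv_count_set_lt hidx (by decide)

-- ===== PORT B =====
-- DP state key (j, d, ph, u): index into rle, amount consumed from rle[j], previous char was '#',
-- number of '?' already replaced by '#'.
def altAdd (nw : PySem.Dict (Int × Int × Bool × Int) Int) (k : Int × Int × Bool × Int)
    (w : Int) : PySem.Dict (Int × Int × Bool × Int) Int :=
  nw.insert k (nw.getD k 0 + w)        -- new[key] = new.get(key, 0) + w

def altChoices (c : String) : List String := if c == "?" then [".", "#"] else [c]

-- body of the inner `for ch in choices` loop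
def altDo (rle : List Int) (m count : Int) (c : String) (kw : (Int × Int × Bool × Int) × Int)
    (nw : PySem.Dict (Int × Int × Bool × Int) Int) (ch : String) :
    PySem.Dict (Int × Int × Bool × Int) Int :=
  let j := kw.1.1; let d := kw.1.2.1; let ph := kw.1.2.2.1; let u := kw.1.2.2.2; let w := kw.2
  if ch == "#" then
    if c == "?" && u ≥ count then nw
    else if j ≥ m then nw
    else altAdd nw (j, d + 1, true, u + (if c == "?" then 1 else 0)) w
  else if ch == "." then
    if ph then
      if PySem.List.pyGetD rle j 0 != d then nw   -- rle[j]: in range in every reachable state (ph → j < m)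
      else altAdd nw (j + 1, 0, false, u) w
    else altAdd nw (j, d, false, u) w
  else altAdd nw (j, d, false, u) w

def altItem (rle : List Int) (m count : Int) (c : String)
    (nw : PySem.Dict (Int × Int × Bool × Int) Int) (kw : (Int × Int × Bool × Int) × Int) :
    PySem.Dict (Int × Int × Bool × Int) Int :=
  (altChoices c).foldl (altDo rle m count c kw) nw

def altStep (rle : List Int) (m count : Int)
    (states : PySem.Dict (Int × Int × Bool × Int) Int) (c : String) :
    PySem.Dict (Int × Int × Bool × Int) Int :=
  states.items.foldl (altItem rle m count c) PySem.Dict.empty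

def perms_alt (report : List String) (rle : List Int) (count : Int) : Int :=
  if "?" ∈ report then
    let m : Int := (rle.length : Int)
    let states := report.foldl (altStep rle m count) (PySem.Dict.empty.insert (0, 0, false, 0) 1)
    states.items.foldl (fun tot kw =>
      let j := kw.1.1; let d := kw.1.2.1; let w := kw.2
      if j == m || (j == m - 1 && PySem.List.pyGetD rle j 0 == d) then tot + w else tot) 0
  else 1

-- ===== PRECONDITION & SPEC =====
def Spec_perms (report : List String) (rle : List Int) (count : Int) (out : Int) : Prop := out = perms_alt report rle count
instance (report : List String) (rle : List Int) (count : Int) (out : Int) : Decidable (Spec_perms report rle count out) := by unfold Spec_perms; infer_instance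

-- ===== CLAIM (what is proved, stated in full; the proofs are below) =====
def Claim_equal_perms : Prop := ∀ (report : List String) (rle : List Int) (count : Int), Dom_perms report rle count → Spec_perms report rle count (perms report rle count)

-- ===== LEMMAS AND PROOFS =====

-- Reference counting machine F: processes the report left to right with state
-- (remaining rle, previous-was-'#', remaining '#'-budget), branching at '?'.
def F : List String → List Int → Bool → Int → Int
  | [], rs, _, _ => if rs = [] ∨ rs = [0] then (1 : Int) else 0
  | c :: cs, rs, ph, cnt =>
    if _h : c = "?" then
      F ("." :: cs) rs ph cnt + (if cnt > 0 then F ("#" :: cs) rs ph (cnt - 1) else 0)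
    else if c = "#" then
      match rs with
      | [] => 0
      | hd :: t => F cs ((hd - 1) :: t) true cnt
    else if c = "." then
      if ph then
        match rs with
        | [] => 0
        | hd :: t => if hd = 0 then F cs t false cnt else 0
      else F cs rs false cnt
    else F cs rs false cnt
termination_by cs _ _ _ => (cs.count "?", cs.length)
decreasing_by
  all_goals first
    | (apply Prod.Lex.left; subst _h; simp [List.count_cons])
    | (apply Prod.Lex.right' <;> simp [List.count_cons, _h])

lemma F_nil (rs : List Int) (ph : Bool) (cnt : Int) :
    F [] rs ph cnt = if rs = [] ∨ rs = [0] then (1 : Int) else 0 := by rw [F.eq_def]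

lemma F_cons (c : String) (cs : List String) (rs : List Int) (ph : Bool) (cnt : Int) :
    F (c :: cs) rs ph cnt =
      if _h : c = "?" then
        F ("." :: cs) rs ph cnt + (if cnt > 0 then F ("#" :: cs) rs ph (cnt - 1) else 0)
      else if c = "#" then
        match rs with
        | [] => 0
        | hd :: t => F cs ((hd - 1) :: t) true cnt
      else if c = "." then
        if ph then
          match rs with
          | [] => 0
          | hd :: t => if hd = 0 then F cs t false cnt else 0
        else F cs rs false cnt
      else F cs rs false cnt := by
  rw [F.eq_def]

-- deterministic run of the machine over a '?'-free prefix (none = dead end)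
def runM : List String → List Int → Bool → Option (List Int × Bool)
  | [], rs, ph => some (rs, ph)
  | c :: cs, rs, ph =>
    if c = "#" then
      match rs with
      | [] => none
      | hd :: t => runM cs ((hd - 1) :: t) true
    else if c = "." then
      if ph then
        match rs with
        | [] => none
        | hd :: t => if hd = 0 then runM cs t false else none
      else runM cs rs false
    else runM cs rs false

def phPrev (ph : Bool) : String := if ph then "#" else ""

-- ipr only looks at prev through the test prev == "#"
lemma ipr_congr_prev (cs : List String) (rs : List Int) (p q : String)
    (h : p = "#" ↔ q = "#") : ipr cs rs p = ipr cs rs q := by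
  cases cs with
  | nil => rfl
  | cons c rest =>
    by_cases h1 : c = "#"
    · simp [ipr, h1]
    · by_cases h2 : c = "."
      · have hpq : (p = "#") = (q = "#") := propext h
        simp only [ipr, h1, h2, if_false, if_true, hpq]
      · simp [ipr, h1, h2]

lemma runM_inv (pre : List String) :
    ∀ {rs : List Int} {ph : Bool} {rs' : List Int} {ph' : Bool},
      (ph = true → rs ≠ []) → runM pre rs ph = some (rs', ph') →
      (ph' = true → rs' ≠ []) := by
  induction pre with
  | nil =>
    intro rs ph rs' ph' hI h
    simp [runM] at h
    obtain ⟨h1, h2⟩ := h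
    subst h1; subst h2; exact hI
  | cons c rest ih =>
    intro rs ph rs' ph' hI h
    by_cases h1 : c = "#"
    · simp only [runM, h1, if_true] at h
      cases rs with
      | nil => simp at h
      | cons hd t => exact ih (by simp) h
    · by_cases h2 : c = "."
      · simp only [runM, h1, h2, if_false, if_true] at h
        cases hph : ph
        · rw [hph] at h; simp only [if_false, Bool.false_eq_true] at h
          exact ih (by simp) h
        · rw [hph] at h; simp only [if_true] at h
          cases rs with
          | nil => simp at h
          | cons hd t =>
            by_cases h0 : hd = 0
            · simp only [h0, if_true, if_pos rfl] at h
              exact ih (by simp) h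
            · simp [h0] at h
      · simp only [runM, h1, h2, if_false] at h
        exact ih (by simp) h

-- F over a '?'-free prefix factors through runM
lemma F_prefix (pre : List String) (hq : "?" ∉ pre) :
    ∀ (cs' : List String) (rs : List Int) (ph : Bool) (cnt : Int),
      F (pre ++ cs') rs ph cnt =
        (runM pre rs ph).elim 0 (fun s => F cs' s.1 s.2 cnt) := by
  induction pre with
  | nil => intro cs' rs ph cnt; simp [runM]
  | cons c rest ih =>
    intro cs' rs ph cnt
    have hc : c ≠ "?" := by intro hc; exact hq (by simp [hc])
    have hrest : "?" ∉ rest := fun hm => hq (by simp [hm])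
    rw [List.cons_append, F_cons]
    rw [dif_neg hc]
    by_cases h1 : c = "#"
    · simp only [h1, if_true, runM]
      cases rs with
      | nil => simp
      | cons hd t => simp only [if_true]; exact ih hrest cs' ((hd - 1) :: t) true cnt
    · by_cases h2 : c = "."
      · simp only [h1, h2, if_false, if_true, runM]
        cases hph : ph
        · simp only [if_false, Bool.false_eq_true]
          exact ih hrest cs' rs false cnt
        · simp only [if_true]
          cases rs with
          | nil => simp
          | cons hd t =>
            by_cases h0 : hd = 0
            · simp only [h0, if_pos rfl]
              exact ih hrest cs' t false cnt
            · simp [h0]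
      · simp only [h1, h2, if_false, runM]
        exact ih hrest cs' rs false cnt

-- ipr over a '?'-free prefix factors through runM
lemma ipr_prefix (pre : List String) (hq : "?" ∉ pre) :
    ∀ (cs' : List String) (rs : List Int) (ph : Bool), (ph = true → rs ≠ []) →
      ipr (pre ++ cs') rs (phPrev ph) =
        (runM pre rs ph).elim false (fun s => ipr cs' s.1 (phPrev s.2)) := by
  induction pre with
  | nil => intro cs' rs ph _; simp [runM]
  | cons c rest ih =>
    intro cs' rs ph hI
    have hc : c ≠ "?" := by intro hc; exact hq (by simp [hc])
    have hrest : "?" ∉ rest := fun hm => hq (by simp [hm])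
    rw [List.cons_append]
    by_cases h1 : c = "#"
    · subst h1
      cases rs with
      | nil => simp [ipr, runM]
      | cons hd t =>
        have l1 : ipr ("#" :: (rest ++ cs')) (hd :: t) (phPrev ph) = ipr (rest ++ cs') ((hd - 1) :: t) "#" := by
          simp [ipr]
        have l2 : runM ("#" :: rest) (hd :: t) ph = runM rest ((hd - 1) :: t) true := by
          simp [runM]
        rw [l1, l2, ipr_congr_prev _ _ "#" (phPrev true) (by simp [phPrev]),
          ih hrest cs' ((hd - 1) :: t) true (by simp)]
    · by_cases h2 : c = "."
      · subst h2
        rcases Bool.eq_false_or_eq_true ph with hph | hph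
        · subst hph
          cases rs with
          | nil => exact absurd rfl (hI rfl)
          | cons hd t =>
            by_cases h0 : hd = 0
            · have l1 : ipr ("." :: (rest ++ cs')) (hd :: t) (phPrev true) = ipr (rest ++ cs') t "." := by
                simp [ipr, phPrev, h0]
              have l2 : runM ("." :: rest) (hd :: t) true = runM rest t false := by
                simp [runM, h0]
              rw [l1, l2, ipr_congr_prev _ _ "." (phPrev false) (by simp [phPrev]),
                ih hrest cs' t false (by simp)]
            · have l1 : ipr ("." :: (rest ++ cs')) (hd :: t) (phPrev true) = false := by
                simp [ipr, phPrev, h0]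
              have l2 : runM ("." :: rest) (hd :: t) true = none := by
                simp [runM, h0]
              rw [l1, l2]
              rfl
        · subst hph
          have l1 : ipr ("." :: (rest ++ cs')) rs (phPrev false) = ipr (rest ++ cs') rs "." := by
            simp [ipr, phPrev]
          have l2 : runM ("." :: rest) rs false = runM rest rs false := by simp [runM]
          rw [l1, l2, ipr_congr_prev _ _ "." (phPrev false) (by simp [phPrev]),
            ih hrest cs' rs false (by simp)]
      · have l1 : ipr (c :: (rest ++ cs')) rs (phPrev ph) = ipr (rest ++ cs') rs c := by
          simp [ipr, h1, h2, hc]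
        have l2 : runM (c :: rest) rs ph = runM rest rs false := by
          simp [runM, h1, h2]
        rw [l1, l2, ipr_congr_prev _ _ c (phPrev false) (by simp [phPrev, h1]),
          ih hrest cs' rs false (by simp)]

-- a failed validity check means no arrangement survives
lemma F_eq_zero_of_ipr_false :
    ∀ (cs : List String) (rs : List Int) (ph : Bool) (cnt : Int), (ph = true → rs ≠ []) →
      ipr cs rs (phPrev ph) = false → F cs rs ph cnt = 0 := by
  intro cs
  induction cs with
  | nil =>
    intro rs ph cnt _ hf
    simp only [ipr, Bool.or_eq_false_iff, beq_eq_false_iff_ne, ne_eq] at hf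
    simp [F_nil, hf.1, hf.2]
  | cons c rest ih =>
    intro rs ph cnt hI hf
    by_cases hc : c = "?"
    · rw [hc] at hf; simp [ipr] at hf
    · rw [F_cons, dif_neg hc]
      by_cases h1 : c = "#"
      · subst h1
        rw [if_pos rfl]
        cases rs with
        | nil => rfl
        | cons hd t =>
          dsimp only
          apply ih _ true cnt (by simp)
          rw [ipr_congr_prev _ _ (phPrev true) "#" (by simp [phPrev])]
          simpa [ipr] using hf
      · by_cases h2 : c = "."
        · subst h2
          rw [if_neg h1, if_pos rfl]
          rcases Bool.eq_false_or_eq_true ph with hph | hph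
          · subst hph
            rw [if_pos rfl]
            cases rs with
            | nil => exact absurd rfl (hI rfl)
            | cons hd t =>
              dsimp only
              by_cases h0 : hd = 0
              · rw [if_pos h0]
                apply ih _ false cnt (by simp)
                rw [ipr_congr_prev _ _ (phPrev false) "." (by simp [phPrev])]
                simpa [ipr, phPrev, h0] using hf
              · rw [if_neg h0]
          · subst hph
            simp only [Bool.false_eq_true, if_false]
            apply ih _ false cnt (by simp)
            rw [ipr_congr_prev _ _ (phPrev false) "." (by simp [phPrev])]
            simpa [ipr, phPrev] using hf
        · rw [if_neg h1, if_neg h2]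
          apply ih _ false cnt (by simp)
          rw [ipr_congr_prev _ _ (phPrev false) c (by simp [phPrev, h1])]
          simpa [ipr, h1, h2, hc] using hf

-- on a fully determined report, F is the 0/1 outcome of the validity check
lemma F_of_noq :
    ∀ (cs : List String) (rs : List Int) (ph : Bool) (cnt : Int), "?" ∉ cs →
      (ph = true → rs ≠ []) →
      F cs rs ph cnt = if ipr cs rs (phPrev ph) then 1 else 0 := by
  intro cs
  induction cs with
  | nil =>
    intro rs ph cnt _ _
    simp only [F_nil, ipr]
    by_cases h1 : rs = [] <;> by_cases h2 : rs = [0] <;> simp [h1, h2]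
  | cons c rest ih =>
    intro rs ph cnt hq hI
    have hc : c ≠ "?" := by intro hc; exact hq (by simp [hc])
    have hrest : "?" ∉ rest := fun hm => hq (by simp [hm])
    rw [F_cons, dif_neg hc]
    by_cases h1 : c = "#"
    · subst h1
      rw [if_pos rfl]
      cases rs with
      | nil => simp [ipr]
      | cons hd t =>
        dsimp only
        have l1 : ipr ("#" :: rest) (hd :: t) (phPrev ph) = ipr rest ((hd - 1) :: t) "#" := by
          simp [ipr]
        rw [l1, ← ipr_congr_prev _ _ (phPrev true) "#" (by simp [phPrev]),
          ih _ true cnt hrest (by simp)]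
    · by_cases h2 : c = "."
      · subst h2
        rw [if_neg h1, if_pos rfl]
        rcases Bool.eq_false_or_eq_true ph with hph | hph
        · subst hph
          rw [if_pos rfl]
          cases rs with
          | nil => exact absurd rfl (hI rfl)
          | cons hd t =>
            dsimp only
            by_cases h0 : hd = 0
            · rw [if_pos h0]
              have l1 : ipr ("." :: rest) (hd :: t) (phPrev true) = ipr rest t "." := by
                simp [ipr, phPrev, h0]
              rw [l1, ← ipr_congr_prev _ _ (phPrev false) "." (by simp [phPrev]),
                ih _ false cnt hrest (by simp)]
            · rw [if_neg h0]
              have l1 : ipr ("." :: rest) (hd :: t) (phPrev true) = false := by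
                simp [ipr, phPrev, h0]
              rw [l1]
              rfl
        · subst hph
          have l1 : ipr ("." :: rest) rs (phPrev false) = ipr rest rs "." := by
            simp [ipr, phPrev]
          simp only [Bool.false_eq_true, if_false]
          rw [l1, ← ipr_congr_prev _ _ (phPrev false) "." (by simp [phPrev]),
            ih _ false cnt hrest (by simp)]
      · rw [if_neg h1, if_neg h2]
        have l1 : ipr (c :: rest) rs (phPrev ph) = ipr rest rs c := by
          simp [ipr, h1, h2, hc]
        rw [l1, ← ipr_congr_prev _ _ (phPrev false) c (by simp [phPrev, h1]),
          ih _ false cnt hrest (by simp)]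

-- ===== A-side: perms = F =====
lemma pv_set_at_len (pre suf : List String) (a x : String) :
    (pre ++ a :: suf).set pre.length x = pre ++ x :: suf := by
  induction pre with
  | nil => rfl
  | cons b t ih => simpa using ih

lemma perms_noq (cs : List String) (rle : List Int) (cnt : Int) (h : "?" ∉ cs) :
    perms cs rle cnt = 1 := by
  have hnone : PySem.List.index? cs "?" = none := (PySem.List.index?_eq_none_iff cs "?").mpr h
  rw [perms]
  split
  · rfl
  · rename_i idx hidx
    rw [hnone] at hidx
    exact absurd hidx (by simp)

lemma perms_eq_F :
    ∀ (n : Nat) (cs : List String) (rs : List Int) (cnt : Int), cs.count "?" = n →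
      "?" ∈ cs → perms cs rs cnt = F cs rs false cnt := by
  intro n
  induction n using Nat.strong_induction_on with
  | _ n IH =>
    intro cs rs cnt hn hmem
    have hsome : (PySem.List.index? cs "?").isSome := (PySem.List.index?_isSome_iff cs "?").mpr hmem
    obtain ⟨k, hk⟩ := Option.isSome_iff_exists.mp hsome
    obtain ⟨pre, suf, hcs, hlen, hpre⟩ := (PySem.List.index?_eq_some_iff cs "?" k).mp hk
    subst hcs
    subst hlen
    have hpre0 : pre.count "?" = 0 := List.count_eq_zero.mpr hpre
    have hn' : suf.count "?" + 1 = n := by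
      rw [← hn]; simp [List.count_append, List.count_cons, hpre0]
    rw [perms]
    split
    · rename_i hidx
      rw [hk] at hidx
      exact absurd hidx (by simp)
    · rename_i idx hidx
      rw [hk] at hidx
      have hidx' : idx = pre.length := by injection hidx.symm
      subst hidx'
      rw [pv_set_at_len pre suf "?" ".", pv_set_at_len pre suf "?" "#"]
      dsimp only
      -- A's validity checks start from prev = "" = phPrev false
      cases hrun : runM pre rs false with
      | none =>
        have h1 : isPossibleRle (pre ++ "." :: suf) rs = false := by
          show ipr (pre ++ "." :: suf) rs (phPrev false) = false
          rw [ipr_prefix pre hpre _ rs false (by simp), hrun]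
          rfl
        have h2 : isPossibleRle (pre ++ "#" :: suf) rs = false := by
          show ipr (pre ++ "#" :: suf) rs (phPrev false) = false
          rw [ipr_prefix pre hpre _ rs false (by simp), hrun]
          rfl
        have hF : F (pre ++ "?" :: suf) rs false cnt = 0 := by
          rw [F_prefix pre hpre _ rs false cnt, hrun]
          rfl
        rw [h1, h2, hF]
        simp
      | some st =>
        obtain ⟨rs', ph'⟩ := st
        have hinv : ph' = true → rs' ≠ [] := runM_inv pre (by simp) hrun
        have hd1 : isPossibleRle (pre ++ "." :: suf) rs = ipr ("." :: suf) rs' (phPrev ph') := by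
          show ipr (pre ++ "." :: suf) rs (phPrev false) = _
          rw [ipr_prefix pre hpre _ rs false (by simp), hrun]
          rfl
        have hd2 : isPossibleRle (pre ++ "#" :: suf) rs = ipr ("#" :: suf) rs' (phPrev ph') := by
          show ipr (pre ++ "#" :: suf) rs (phPrev false) = _
          rw [ipr_prefix pre hpre _ rs false (by simp), hrun]
          rfl
        have hbranch : ∀ x : String, x ≠ "?" →
            ∀ c' : Int, (if isPossibleRle (pre ++ x :: suf) rs then perms (pre ++ x :: suf) rs c' else 0)
              = F (x :: suf) rs' ph' c' ∧
                isPossibleRle (pre ++ x :: suf) rs = ipr (x :: suf) rs' (phPrev ph') → True := by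
          intro _ _ _ _; trivial
        clear hbranch
        have key : ∀ (x : String), x ≠ "?" →
            isPossibleRle (pre ++ x :: suf) rs = ipr (x :: suf) rs' (phPrev ph') →
            ∀ c' : Int,
            (if isPossibleRle (pre ++ x :: suf) rs then perms (pre ++ x :: suf) rs c' else 0)
              = F (x :: suf) rs' ph' c' := by
          intro x hx hipr c'
          by_cases hin : "?" ∈ suf
          · have hmem' : "?" ∈ pre ++ x :: suf := by
              simp [List.mem_append, List.mem_cons, hin]
            by_cases htrue : ipr (x :: suf) rs' (phPrev ph') = true
            · rw [hipr, htrue, if_pos rfl]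
              have hcnt' : (pre ++ x :: suf).count "?" = suf.count "?" := by
                have hxq : ((x == "?") : Bool) = false := by simp [hx]
                simp [List.count_append, List.count_cons, hpre0, hxq]
              rw [IH (suf.count "?") (by omega) (pre ++ x :: suf) rs c' hcnt' hmem']
              rw [F_prefix pre hpre _ rs false c', hrun]
              rfl
            · have hfalse : ipr (x :: suf) rs' (phPrev ph') = false := by
                simpa using htrue
              rw [hipr, hfalse, if_neg (by simp)]
              exact (F_eq_zero_of_ipr_false (x :: suf) rs' ph' c' hinv hfalse).symm
          · have hnoq : "?" ∉ pre ++ x :: suf := by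
              simp only [List.mem_append, List.mem_cons]
              rintro (h | h | h)
              · exact hpre h
              · exact hx h.symm
              · exact hin h
            rw [perms_noq _ rs c' hnoq, hipr,
              F_of_noq (x :: suf) rs' ph' c'
                (fun hm => (List.mem_cons.mp hm).elim (fun h => hx h.symm) hin) hinv]
        have kd := key "." (by decide) hd1 cnt
        have kh := key "#" (by decide) hd2 (cnt - 1)
        have hF : F (pre ++ "?" :: suf) rs false cnt = F ("?" :: suf) rs' ph' cnt := by
          rw [F_prefix pre hpre _ rs false cnt, hrun]
          rfl
        rw [hF, F_cons, dif_pos rfl]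
        by_cases hcnt : cnt > 0
        · rw [if_pos hcnt, if_pos hcnt, kd, kh]
        · rw [if_neg hcnt, if_neg hcnt, kd]
          omega

-- ===== B-side: perms_alt = F =====

-- decoded machine state of a DP key
def stRs (rle : List Int) (j d : Int) : List Int :=
  if j < (rle.length : Int) then (PySem.List.pyGetD rle j 0 - d) :: rle.drop (j.toNat + 1) else []

def GoodK (m : Int) (k : Int × Int × Bool × Int) : Prop :=
  0 ≤ k.1 ∧ k.1 ≤ m ∧ (k.2.2.1 = true → k.1 < m)

-- weighted total of F over the items of a state dictionary
def Sf (rle : List Int) (count : Int) (rest : List String)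
    (items : List ((Int × Int × Bool × Int) × Int)) : Int :=
  (items.map (fun kw => kw.2 * F rest (stRs rle kw.1.1 kw.1.2.1) kw.1.2.2.1 (count - kw.1.2.2.2))).sum

lemma altAdd_sum (d : PySem.Dict (Int × Int × Bool × Int) Int) (hnd : d.keys.Nodup)
    (k : Int × Int × Bool × Int) (w : Int) (f : (Int × Int × Bool × Int) → Int) :
    ((altAdd d k w).items.map (fun kw => kw.2 * f kw.1)).sum
      = (d.items.map (fun kw => kw.2 * f kw.1)).sum + w * f k := by
  by_cases hc : d.contains k = true
  · obtain ⟨v0, hv0⟩ := Option.isSome_iff_exists.mp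
      ((PySem.Dict.contains_eq_isSome_get? d k) ▸ hc)
    have hmem := PySem.Dict.mem_items_of_get?_eq_some d hv0
    have hgd := PySem.Dict.getD_of_get?_eq_some d (0 : Int) hv0
    simp only [altAdd]
    rw [PySem.Dict.items_insert_of_contains d _ hc, hgd]
    obtain ⟨l1, l2, hsplit⟩ := List.append_of_mem hmem
    have hndk : ((l1 ++ (k, v0) :: l2).map Prod.fst).Nodup := by
      have hkeys : d.keys = d.items.map Prod.fst := rfl
      rw [hkeys, hsplit] at hnd
      exact hnd
    simp only [List.map_append, List.map_cons, List.nodup_append, List.nodup_cons,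
      List.mem_cons, List.mem_append] at hndk
    have hk1 : ∀ p ∈ l1, (p.1 == k) = false := by
      intro p hp
      have : p.1 ≠ k := by
        intro he
        exact (hndk.2.2 p.1 (List.mem_map_of_mem hp) k (Or.inl rfl)) he
      simpa using this
    have hk2 : ∀ p ∈ l2, (p.1 == k) = false := by
      intro p hp
      have : p.1 ≠ k := by
        intro he
        exact hndk.2.1.1 (he ▸ List.mem_map_of_mem hp)
      simpa using this
    rw [hsplit]
    simp only [List.map_append, List.map_cons]
    have e1 : l1.map (fun p => if (p.1 == k) = true then (k, v0 + w) else p) = l1 := by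
      conv_rhs => rw [← List.map_id l1]
      exact List.map_congr_left (fun p hp => by simp [hk1 p hp])
    have e2 : l2.map (fun p => if (p.1 == k) = true then (k, v0 + w) else p) = l2 := by
      conv_rhs => rw [← List.map_id l2]
      exact List.map_congr_left (fun p hp => by simp [hk2 p hp])
    rw [e1, e2]
    simp only [beq_self_eq_true, if_true, List.map_append, List.map_cons, List.sum_append,
      List.sum_cons]
    ring
  · have hc' : d.contains k = false := by simpa using hc
    simp only [altAdd]
    rw [PySem.Dict.items_insert_of_not_contains d _ hc',
      PySem.Dict.getD_of_not_contains d _ hc']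
    simp only [List.map_append, List.map_cons, List.map_nil, List.sum_append, List.sum_cons,
      List.sum_nil]
    ring

lemma altAdd_nodup (d : PySem.Dict (Int × Int × Bool × Int) Int) (hnd : d.keys.Nodup)
    (k : Int × Int × Bool × Int) (w : Int) : (altAdd d k w).keys.Nodup :=
  PySem.Dict.nodup_keys_insert d k _ hnd

lemma altAdd_keys (d : PySem.Dict (Int × Int × Bool × Int) Int)
    (k k' : Int × Int × Bool × Int) (w : Int) (h : k' ∈ (altAdd d k w).keys) :
    k' = k ∨ k' ∈ d.keys :=
  (PySem.Dict.mem_keys_insert d k k' _).mp h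

lemma altAdd_Sf (rle : List Int) (count : Int) (rest : List String)
    (d : PySem.Dict (Int × Int × Bool × Int) Int) (hnd : d.keys.Nodup)
    (k : Int × Int × Bool × Int) (w : Int) :
    Sf rle count rest (altAdd d k w).items
      = Sf rle count rest d.items + w * F rest (stRs rle k.1 k.2.1) k.2.2.1 (count - k.2.2.2) := by
  simpa only [Sf] using altAdd_sum d hnd k w
    (fun k => F rest (stRs rle k.1 k.2.1) k.2.2.1 (count - k.2.2.2))

lemma stRs_pos (rle : List Int) (j d : Int) (h : j < (rle.length : Int)) :
    stRs rle j d = (PySem.List.pyGetD rle j 0 - d) :: rle.drop (j.toNat + 1) := if_pos h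

lemma stRs_neg (rle : List Int) (j d : Int) (h : ¬ j < (rle.length : Int)) :
    stRs rle j d = [] := if_neg h

lemma stRs_tail (rle : List Int) (j : Int) (h0 : 0 ≤ j) (hlt : j < (rle.length : Int)) :
    stRs rle (j + 1) 0 = rle.drop (j.toNat + 1) := by
  by_cases h : j + 1 < (rle.length : Int)
  · rw [stRs_pos rle _ _ h]
    have hn : (j + 1).toNat = j.toNat + 1 := by omega
    have hlt' : j.toNat + 1 < rle.length := by omega
    rw [PySem.List.pyGetD_eq_getElem rle 0 (by omega) (by omega),
      List.drop_eq_getElem_cons hlt']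
    simp [hn]
  · rw [stRs_neg rle _ _ h]
    symm
    rw [List.drop_eq_nil_iff]
    omega

lemma F_dot (rest : List String) (rs : List Int) (ph : Bool) (cnt : Int) :
    F ("." :: rest) rs ph cnt =
      if ph then
        (match rs with | [] => 0 | hd :: t => if hd = 0 then F rest t false cnt else 0)
      else F rest rs false cnt := by
  rw [F_cons, dif_neg (by decide), if_neg (by decide), if_pos rfl]

lemma F_hash (rest : List String) (rs : List Int) (ph : Bool) (cnt : Int) :
    F ("#" :: rest) rs ph cnt =
      (match rs with | [] => 0 | hd :: t => F rest ((hd - 1) :: t) true cnt) := by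
  rw [F_cons, dif_neg (by decide), if_pos rfl]

lemma F_quest (rest : List String) (rs : List Int) (ph : Bool) (cnt : Int) :
    F ("?" :: rest) rs ph cnt =
      F ("." :: rest) rs ph cnt + (if cnt > 0 then F ("#" :: rest) rs ph (cnt - 1) else 0) := by
  rw [F_cons, dif_pos rfl]

lemma F_other (c : String) (h1 : c ≠ "?") (h2 : c ≠ "#") (h3 : c ≠ ".")
    (rest : List String) (rs : List Int) (ph : Bool) (cnt : Int) :
    F (c :: rest) rs ph cnt = F rest rs false cnt := by
  rw [F_cons, dif_neg h1, if_neg h2, if_neg h3]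

-- nodup + all-keys-good, the invariant carried through the DP
def NG (rle : List Int) (d : PySem.Dict (Int × Int × Bool × Int) Int) : Prop :=
  d.keys.Nodup ∧ ∀ k' ∈ d.keys, GoodK (rle.length : Int) k'

lemma NG_altAdd (rle : List Int) (d : PySem.Dict (Int × Int × Bool × Int) Int)
    (h : NG rle d) (k : Int × Int × Bool × Int) (hk : GoodK (rle.length : Int) k) (w : Int) :
    NG rle (altAdd d k w) :=
  ⟨altAdd_nodup d h.1 k w,
   fun k' hk' => (altAdd_keys d k k' w hk').elim (fun e => e ▸ hk) (h.2 k')⟩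

lemma altDo_eval_dot (rle : List Int) (m count : Int) (c : String)
    (kw : (Int × Int × Bool × Int) × Int) (nw : PySem.Dict (Int × Int × Bool × Int) Int) :
    altDo rle m count c kw nw "." =
      (if kw.1.2.2.1 then
        (if PySem.List.pyGetD rle kw.1.1 0 != kw.1.2.1 then nw
         else altAdd nw (kw.1.1 + 1, 0, false, kw.1.2.2.2) kw.2)
       else altAdd nw (kw.1.1, kw.1.2.1, false, kw.1.2.2.2) kw.2) := rfl

lemma altDo_eval_hash (rle : List Int) (m count : Int) (c : String)
    (kw : (Int × Int × Bool × Int) × Int) (nw : PySem.Dict (Int × Int × Bool × Int) Int) :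
    altDo rle m count c kw nw "#" =
      (if c == "?" && kw.1.2.2.2 ≥ count then nw
       else if kw.1.1 ≥ m then nw
       else altAdd nw (kw.1.1, kw.1.2.1 + 1, true, kw.1.2.2.2 + (if c == "?" then 1 else 0)) kw.2) := rfl

lemma altDo_eval_other (rle : List Int) (m count : Int) (c ch : String)
    (h1 : (ch == "#") = false) (h2 : (ch == ".") = false)
    (kw : (Int × Int × Bool × Int) × Int) (nw : PySem.Dict (Int × Int × Bool × Int) Int) :
    altDo rle m count c kw nw ch =
      altAdd nw (kw.1.1, kw.1.2.1, false, kw.1.2.2.2) kw.2 := by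
  simp only [altDo, h1, h2, Bool.false_eq_true, if_false]

-- contribution of the "." choice
lemma dot_contrib (rle : List Int) (count : Int) (c : String) (rest : List String)
    (j d u w : Int) (ph : Bool)
    (hj0 : 0 ≤ j) (hjm : j ≤ (rle.length : Int)) (hph : ph = true → j < (rle.length : Int))
    (nw : PySem.Dict (Int × Int × Bool × Int) Int) (hng : NG rle nw) :
    Sf rle count rest (altDo rle (rle.length : Int) count c ((j, d, ph, u), w) nw ".").items
        = Sf rle count rest nw.items + w * F ("." :: rest) (stRs rle j d) ph (count - u)
      ∧ NG rle (altDo rle (rle.length : Int) count c ((j, d, ph, u), w) nw ".") := by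
  rw [altDo_eval_dot]
  cases ph with
  | false =>
    rw [if_neg (by simp)]
    refine ⟨?_, NG_altAdd rle nw hng _ ⟨hj0, hjm, by simp⟩ w⟩
    rw [altAdd_Sf rle count rest nw hng.1 (j, d, false, u) w, F_dot]
    simp
  | true =>
    have hjlt := hph rfl
    dsimp only
    by_cases h0 : PySem.List.pyGetD rle j 0 = d
    · have hne : (PySem.List.pyGetD rle j 0 != d) = false := by simp [h0]
      rw [if_pos rfl, hne]
      simp only [Bool.false_eq_true, if_false]
      refine ⟨?_, NG_altAdd rle nw hng _ ⟨by omega, by omega, by simp⟩ w⟩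
      rw [altAdd_Sf rle count rest nw hng.1 (j + 1, 0, false, u) w, F_dot, if_pos rfl,
        stRs_pos rle j d hjlt]
      dsimp only
      rw [if_pos (by omega : PySem.List.pyGetD rle j 0 - d = 0)]
      rw [stRs_tail rle j hj0 hjlt]
    · have hne : (PySem.List.pyGetD rle j 0 != d) = true := by simp [h0]
      rw [if_pos rfl, hne, if_pos rfl]
      refine ⟨?_, hng⟩
      rw [F_dot, if_pos rfl, stRs_pos rle j d hjlt]
      dsimp only
      rw [if_neg (by omega : ¬ PySem.List.pyGetD rle j 0 - d = 0)]
      ring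

-- contribution of the "#" choice when the report character is a literal '#'
lemma hash_contrib_lit (rle : List Int) (count : Int) (rest : List String)
    (j d u w : Int) (ph : Bool)
    (hj0 : 0 ≤ j) (hjm : j ≤ (rle.length : Int))
    (nw : PySem.Dict (Int × Int × Bool × Int) Int) (hng : NG rle nw) :
    Sf rle count rest (altDo rle (rle.length : Int) count "#" ((j, d, ph, u), w) nw "#").items
        = Sf rle count rest nw.items + w * F ("#" :: rest) (stRs rle j d) ph (count - u)
      ∧ NG rle (altDo rle (rle.length : Int) count "#" ((j, d, ph, u), w) nw "#") := by
  rw [altDo_eval_hash]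
  simp only [show (("#" : String) == "?") = false from rfl, Bool.false_and, Bool.false_eq_true,
    if_false]
  by_cases hge : j ≥ (rle.length : Int)
  · rw [if_pos (by simpa using hge)]
    refine ⟨?_, hng⟩
    rw [F_hash, stRs_neg rle j d (by omega)]
    simp
  · rw [if_neg (by simpa using hge)]
    have hjlt : j < (rle.length : Int) := by omega
    refine ⟨?_, NG_altAdd rle nw hng _ ⟨hj0, by omega, fun _ => hjlt⟩ w⟩
    rw [altAdd_Sf rle count rest nw hng.1 (j, d + 1, true, u + 0) w, F_hash,
      stRs_pos rle j d hjlt]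
    dsimp only
    rw [stRs_pos rle j (d + 1) hjlt]
    have he : PySem.List.pyGetD rle j 0 - (d + 1) = PySem.List.pyGetD rle j 0 - d - 1 := by ring
    rw [he]
    norm_num

-- contribution of the "#" choice when the report character is '?'
lemma hash_contrib_q (rle : List Int) (count : Int) (rest : List String)
    (j d u w : Int) (ph : Bool)
    (hj0 : 0 ≤ j) (hjm : j ≤ (rle.length : Int))
    (nw : PySem.Dict (Int × Int × Bool × Int) Int) (hng : NG rle nw) :
    Sf rle count rest (altDo rle (rle.length : Int) count "?" ((j, d, ph, u), w) nw "#").items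
        = Sf rle count rest nw.items
          + w * (if count - u > 0 then F ("#" :: rest) (stRs rle j d) ph (count - u - 1) else 0)
      ∧ NG rle (altDo rle (rle.length : Int) count "?" ((j, d, ph, u), w) nw "#") := by
  rw [altDo_eval_hash]
  simp only [show (("?" : String) == "?") = true from rfl, Bool.true_and, if_true]
  by_cases hguard : u ≥ count
  · rw [if_pos (by simpa using hguard)]
    refine ⟨?_, hng⟩
    rw [if_neg (by omega)]
    ring
  · rw [if_neg (by simpa using hguard)]
    rw [if_pos (by omega : count - u > 0)]
    by_cases hge : j ≥ (rle.length : Int)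
    · rw [if_pos (by simpa using hge)]
      refine ⟨?_, hng⟩
      rw [F_hash, stRs_neg rle j d (by omega)]
      simp
    · rw [if_neg (by simpa using hge)]
      have hjlt : j < (rle.length : Int) := by omega
      refine ⟨?_, NG_altAdd rle nw hng _ ⟨hj0, by omega, fun _ => hjlt⟩ w⟩
      rw [altAdd_Sf rle count rest nw hng.1 (j, d + 1, true, u + 1) w, F_hash,
        stRs_pos rle j d hjlt]
      dsimp only
      rw [stRs_pos rle j (d + 1) hjlt]
      have he : PySem.List.pyGetD rle j 0 - (d + 1) = PySem.List.pyGetD rle j 0 - d - 1 := by ring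
      have hc : count - (u + 1) = count - u - 1 := by ring
      rw [he, hc]

-- one item of the old dictionary contributes w * F (c :: rest) on its decoded state
lemma altItem_spec (rle : List Int) (count : Int) (c : String) (rest : List String)
    (k : Int × Int × Bool × Int) (w : Int) (hg : GoodK (rle.length : Int) k)
    (nw : PySem.Dict (Int × Int × Bool × Int) Int) (hng : NG rle nw) :
    Sf rle count rest (altItem rle (rle.length : Int) count c nw (k, w)).items
        = Sf rle count rest nw.items
          + w * F (c :: rest) (stRs rle k.1 k.2.1) k.2.2.1 (count - k.2.2.2)
      ∧ NG rle (altItem rle (rle.length : Int) count c nw (k, w)) := by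
  obtain ⟨j, d, ph, u⟩ := k
  obtain ⟨hj0, hjm, hphg⟩ := hg
  dsimp only at hj0 hjm hphg ⊢
  unfold altItem altChoices
  by_cases hq : c = "?"
  · subst hq
    rw [show (if (("?" : String) == "?") = true then [".", "#"] else ["?"]) = [".", "#"] from rfl]
    simp only [List.foldl_cons, List.foldl_nil]
    obtain ⟨hd1, hng1⟩ := dot_contrib rle count "?" rest j d u w ph hj0 hjm hphg nw hng
    obtain ⟨hd2, hng2⟩ := hash_contrib_q rle count rest j d u w ph hj0 hjm _ hng1
    refine ⟨?_, hng2⟩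
    rw [hd2, hd1, F_quest]
    ring
  · rw [if_neg (by simpa using hq)]
    simp only [List.foldl_cons, List.foldl_nil]
    by_cases h1 : c = "#"
    · subst h1
      exact hash_contrib_lit rle count rest j d u w ph hj0 hjm nw hng
    · by_cases h2 : c = "."
      · subst h2
        exact dot_contrib rle count "." rest j d u w ph hj0 hjm hphg nw hng
      · rw [altDo_eval_other rle _ count c c (by simpa using h1) (by simpa using h2)]
        dsimp only
        refine ⟨?_, NG_altAdd rle nw hng _ ⟨hj0, hjm, by simp⟩ w⟩
        rw [altAdd_Sf rle count rest nw hng.1 (j, d, false, u) w,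
          F_other c hq h1 h2]

lemma items_fold (rle : List Int) (count : Int) (c : String) (rest : List String) :
    ∀ (items : List ((Int × Int × Bool × Int) × Int)),
      (∀ kw ∈ items, GoodK (rle.length : Int) kw.1) →
      ∀ (acc : PySem.Dict (Int × Int × Bool × Int) Int), NG rle acc →
      Sf rle count rest (items.foldl (altItem rle (rle.length : Int) count c) acc).items
          = Sf rle count rest acc.items + Sf rle count (c :: rest) items
        ∧ NG rle (items.foldl (altItem rle (rle.length : Int) count c) acc) := by
  intro items
  induction items with
  | nil => intro _ acc hacc; simpa [Sf] using hacc
  | cons kw tl ih =>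
    intro hitems acc hacc
    obtain ⟨kk, ww⟩ := kw
    simp only [List.foldl_cons]
    obtain ⟨h1, hng1⟩ := altItem_spec rle count c rest kk ww
      (hitems (kk, ww) (List.mem_cons_self)) acc hacc
    obtain ⟨h2, hng2⟩ := ih (fun kw hm => hitems kw (List.mem_cons_of_mem _ hm)) _ hng1
    refine ⟨?_, hng2⟩
    rw [h2, h1]
    simp only [Sf, List.map_cons, List.sum_cons]
    ring

lemma NG_empty (rle : List Int) : NG rle PySem.Dict.empty := by
  constructor
  · exact PySem.Dict.nodup_keys_empty
  · intro k hk
    simp [PySem.Dict.keys_empty] at hk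

lemma altStep_spec (rle : List Int) (count : Int) (c : String) (rest : List String)
    (states : PySem.Dict (Int × Int × Bool × Int) Int) (hng : NG rle states)
    (hitems : ∀ kw ∈ states.items, GoodK (rle.length : Int) kw.1) :
    Sf rle count rest (altStep rle (rle.length : Int) count states c).items
        = Sf rle count (c :: rest) states.items
      ∧ NG rle (altStep rle (rle.length : Int) count states c) := by
  unfold altStep
  obtain ⟨h1, h2⟩ := items_fold rle count c rest states.items hitems PySem.Dict.empty (NG_empty rle)
  refine ⟨?_, h2⟩
  rw [h1]
  rw [show (PySem.Dict.empty : PySem.Dict (Int × Int × Bool × Int) Int).items = [] from rfl]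
  simp [Sf]

lemma good_of_NG (rle : List Int) (d : PySem.Dict (Int × Int × Bool × Int) Int)
    (h : NG rle d) : ∀ kw ∈ d.items, GoodK (rle.length : Int) kw.1 :=
  fun kw hm => h.2 kw.1 (List.mem_map_of_mem hm)

lemma altFold_spec (rle : List Int) (count : Int) :
    ∀ (cs : List String) (states : PySem.Dict (Int × Int × Bool × Int) Int),
      NG rle states →
      Sf rle count [] (cs.foldl (altStep rle (rle.length : Int) count) states).items
          = Sf rle count cs states.items
        ∧ NG rle (cs.foldl (altStep rle (rle.length : Int) count) states) := by
  intro cs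
  induction cs with
  | nil => intro states hng; exact ⟨rfl, hng⟩
  | cons c cs' ih =>
    intro states hng
    simp only [List.foldl_cons]
    obtain ⟨h1, hng1⟩ := altStep_spec rle count c cs' states hng (good_of_NG rle states hng)
    obtain ⟨h2, hng2⟩ := ih _ hng1
    exact ⟨by rw [h2, h1], hng2⟩

lemma final_cond (rle : List Int) (count : Int) (k : Int × Int × Bool × Int) (w : Int)
    (hg : GoodK (rle.length : Int) k) :
    (if (k.1 == (rle.length : Int)
          || (k.1 == (rle.length : Int) - 1 && PySem.List.pyGetD rle k.1 0 == k.2.1)) = true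
     then w else 0)
      = w * F [] (stRs rle k.1 k.2.1) k.2.2.1 (count - k.2.2.2) := by
  obtain ⟨j, d, ph, u⟩ := k
  obtain ⟨hj0, hjm, hphg⟩ := hg
  dsimp only at *
  by_cases hj : j = (rle.length : Int)
  · rw [if_pos (by simp [hj]), stRs_neg rle j d (by omega), F_nil,
      if_pos (Or.inl rfl)]
    ring
  · have hjlt : j < (rle.length : Int) := by omega
    rw [stRs_pos rle j d hjlt, F_nil]
    by_cases h1 : j = (rle.length : Int) - 1
    · subst h1
      by_cases h2 : PySem.List.pyGetD rle ((rle.length : Int) - 1) 0 = d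
      · have hdrop : rle.drop (((rle.length : Int) - 1).toNat + 1) = [] := by
          rw [List.drop_eq_nil_iff]; omega
        rw [if_pos (by simp [h2]), if_pos (Or.inr (by simp [h2, hdrop]; omega))]
        ring
      · rw [if_neg (by simp [hj, h2]), if_neg ?_]
        · ring
        · rintro (h | h)
          · exact absurd h (by simp)
          · simp only [List.cons.injEq] at h
            omega
    · have hdrop : rle.drop (j.toNat + 1) ≠ [] := by
        rw [Ne, List.drop_eq_nil_iff]; omega
      rw [if_neg (by simp [hj, h1]), if_neg ?_]
      · ring
      · rintro (h | h)
        · exact absurd h (by simp)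
        · simp only [List.cons.injEq] at h
          exact hdrop h.2

-- the final summation loop computes Sf rle count []
lemma final_sum (rle : List Int) (count : Int) :
    ∀ (items : List ((Int × Int × Bool × Int) × Int)) (tot : Int),
      (∀ kw ∈ items, GoodK (rle.length : Int) kw.1) →
      items.foldl (fun tot kw =>
        let j := kw.1.1; let d := kw.1.2.1; let w := kw.2
        if j == (rle.length : Int) || (j == (rle.length : Int) - 1 && PySem.List.pyGetD rle j 0 == d)
        then tot + w else tot) tot
        = tot + Sf rle count [] items := by
  intro items
  induction items with
  | nil => intro tot _; simp [Sf]
  | cons kw tl ih =>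
    intro tot hitems
    simp only [List.foldl_cons]
    rw [ih _ (fun kw hm => hitems kw (List.mem_cons_of_mem _ hm))]
    simp only [Sf, List.map_cons, List.sum_cons]
    rw [← final_cond rle count kw.1 kw.2 (hitems kw List.mem_cons_self)]
    by_cases hC : (kw.1.1 == ((rle.length : Int))
        || (kw.1.1 == (rle.length : Int) - 1
            && PySem.List.pyGetD rle kw.1.1 0 == kw.1.2.1)) = true
    · simp only [hC, if_true]; ring
    · simp only [Bool.not_eq_true] at hC
      simp only [hC, Bool.false_eq_true, if_false]
      ring

lemma stRs_zero (rle : List Int) : stRs rle 0 0 = rle := by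
  cases rle with
  | nil => rw [stRs_neg _ _ _ (by simp)]
  | cons a t =>
    rw [stRs_pos _ _ _ (by simp),
      PySem.List.pyGetD_eq_getElem _ _ (le_refl 0) (by simp)]
    simp

lemma perms_alt_eq_F (report : List String) (rle : List Int) (count : Int)
    (h : "?" ∈ report) : perms_alt report rle count = F report rle false count := by
  unfold perms_alt
  rw [if_pos h]
  dsimp only
  have hngi : NG rle (PySem.Dict.empty.insert ((0 : Int), (0 : Int), false, (0 : Int)) (1 : Int)) := by
    refine ⟨PySem.Dict.nodup_keys_insert _ _ _ PySem.Dict.nodup_keys_empty, ?_⟩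
    intro k' hk'
    rcases (PySem.Dict.mem_keys_insert _ _ _ _).mp hk' with he | he
    · subst he
      exact ⟨le_refl 0, Int.natCast_nonneg _, by simp⟩
    · rw [PySem.Dict.keys_empty] at he
      simp at he
  obtain ⟨hS, hng⟩ := altFold_spec rle count report _ hngi
  rw [final_sum rle count _ 0 (good_of_NG rle _ hng), hS,
    show (PySem.Dict.empty.insert ((0 : Int), (0 : Int), false, (0 : Int)) (1 : Int)).items
      = [(((0 : Int), (0 : Int), false, (0 : Int)), (1 : Int))] from rfl]
  simp only [Sf, List.map_cons, List.map_nil, List.sum_cons, List.sum_nil]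
  rw [stRs_zero, sub_zero]
  ring

-- ===== VERDICT (by name: the statement is the Claim_ definition above) =====
theorem perms_spec : Claim_equal_perms := by
  intro report rle count _
  unfold Spec_perms
  by_cases h : "?" ∈ report
  · rw [perms_alt_eq_F report rle count h, ← perms_eq_F (report.count "?") report rle count rfl h]
  · have hnone : PySem.List.index? report "?" = none :=
      (PySem.List.index?_eq_none_iff report "?").mpr h
    rw [perms]
    split
    · simp [perms_alt, h]
    · rename_i idx hidx
      rw [hnone] at hidx
      exact absurd hidx (by simp)
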